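-- pv_equiv track=rewrite | github.com/Cleamx/L3 | pythonAtelier/Atelier_5/partie3.py | est_voisin
-- ===== SOURCE A (Python) =====
-- def listeArcs(mat:object)->list:
--     """fonction qui retourne la liste de tuples des arcs de la matrice
--
--     Args:
--         mat (object): matrice
--
--     Returns:
--         list: liste de tuples des arcs
--     """
--
--     resArcs = []
--     tailleMat = len(mat)
--
--     for lignes in range(tailleMat):
--         for colonne in range(tailleMat):
--             if mat[lignes][colonne] == (1.0):
--                 resArcs.append((lignes,colonne))
--     return resArcs
--
-- def est_voisin(mat:object, S: int, V:int)->bool: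
--     """fonction qui retourne true si les deux sommets sont voisins sinon false avec boucle for
--
--     Args:
--         mat (object): matrice
--         S (int): premier sommet
--         V (int): deuxieme sommet
--
--     Returns:
--         bool: true si les deux sommets sont voisins sinon false
--     """
--     lst_arc = listeArcs(mat)
--     taille_lst_arc = len(lst_arc)
--     res = False
--     for i in range(taille_lst_arc):
--         if lst_arc[i] == (S,V) or lst_arc[i] == (V,S):
--             res = True
--     return res
-- ===== SOURCE B (Python) =====
-- def est_voisin(mat, S, V):
--     n = len(mat)
--     if 0 <= S < n and 0 <= V < n:
--         return mat[S][V] == 1.0 or mat[V][S] == 1.0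
--     return False
-- ===== Notes on version B (the rewrite author's own statement) =====
-- stated objective: faster
-- what changed: B replaces A's 'enumerate every arc of the matrix into a list, then linearly scan that list for (S,V) or (V,S)' with a single bounds check followed by two direct matrix lookups mat[S][V]/mat[V][S].
import Mathlib
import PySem

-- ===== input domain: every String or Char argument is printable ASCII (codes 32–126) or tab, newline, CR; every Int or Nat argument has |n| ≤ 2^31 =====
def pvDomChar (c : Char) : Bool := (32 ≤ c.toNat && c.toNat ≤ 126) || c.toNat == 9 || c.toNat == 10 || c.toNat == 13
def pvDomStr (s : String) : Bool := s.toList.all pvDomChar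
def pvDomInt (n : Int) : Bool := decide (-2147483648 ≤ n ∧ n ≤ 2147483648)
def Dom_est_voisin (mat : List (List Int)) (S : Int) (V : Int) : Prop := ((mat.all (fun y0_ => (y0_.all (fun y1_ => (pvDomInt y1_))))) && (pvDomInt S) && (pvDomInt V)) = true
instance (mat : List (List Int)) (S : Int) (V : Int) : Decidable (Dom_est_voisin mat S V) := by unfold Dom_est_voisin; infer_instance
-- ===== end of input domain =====

-- B replaces A's "build the full arc list, then linearly scan it" with a bounds
-- check and two direct matrix lookups (objective: faster).

-- ===== PORT A =====
-- helper of A: listeArcs builds the list of all arcs (i, j) with mat[i][j] == 1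
def listeArcs (mat : List (List Int)) : List (Int × Int) :=
  let tailleMat : Int := mat.length
  (PySem.List.pyRange 0 tailleMat 1).foldl (fun resArcs lignes =>
    (PySem.List.pyRange 0 tailleMat 1).foldl (fun res colonne =>
      if PySem.List.pyGetD (PySem.List.pyGetD mat lignes []) colonne 0 == 1 then
        res ++ [(lignes, colonne)]
      else res) resArcs) []

def est_voisin (mat : List (List Int)) (S : Int) (V : Int) : Bool :=
  let lst_arc := listeArcs mat
  let taille_lst_arc : Int := lst_arc.length
  (PySem.List.pyRange 0 taille_lst_arc 1).foldl (fun res i =>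
    if PySem.List.pyGetD lst_arc i (0, 0) == (S, V) ||
       PySem.List.pyGetD lst_arc i (0, 0) == (V, S) then true else res) false

-- ===== PORT B =====
def est_voisin_alt (mat : List (List Int)) (S : Int) (V : Int) : Bool :=
  let n : Int := mat.length
  if 0 ≤ S ∧ S < n ∧ 0 ≤ V ∧ V < n then
    (PySem.List.pyGetD (PySem.List.pyGetD mat S []) V 0 == 1) ||
    (PySem.List.pyGetD (PySem.List.pyGetD mat V []) S 0 == 1)
  else false

-- ===== PRECONDITION & SPEC =====
-- A indexes mat[lignes][colonne] for all lignes, colonne < len(mat); on a ragged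
-- matrix with a row shorter than len(mat) the Python raises IndexError, so
-- exactly those inputs are excluded.
def Pre_est_voisin (mat : List (List Int)) (S : Int) (V : Int) : Prop :=
  ∀ row ∈ mat, mat.length ≤ row.length
instance (mat : List (List Int)) (S : Int) (V : Int) : Decidable (Pre_est_voisin mat S V) := by unfold Pre_est_voisin; infer_instance
def pvWitness_est_voisin : List (List Int) × Int × Int := ([[0, 1], [1, 0]], 0, 1)

def Spec_est_voisin (mat : List (List Int)) (S : Int) (V : Int) (out : Bool) : Prop := out = est_voisin_alt mat S V
instance (mat : List (List Int)) (S : Int) (V : Int) (out : Bool) : Decidable (Spec_est_voisin mat S V out) := by unfold Spec_est_voisin; infer_instance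

-- ===== CLAIM (what is proved, stated in full; the proofs are below) =====
def Claim_equal_est_voisin : Prop := ∀ (mat : List (List Int)) (S : Int) (V : Int), Dom_est_voisin mat S V → Pre_est_voisin mat S V → Spec_est_voisin mat S V (est_voisin mat S V)

-- ===== LEMMAS AND PROOFS =====

-- the arc list as a flatMap over rows of the filtered column range
theorem listeArcs_eq (mat : List (List Int)) :
    listeArcs mat =
      (PySem.List.pyRange 0 (mat.length : Int) 1).flatMap (fun i =>
        ((PySem.List.pyRange 0 (mat.length : Int) 1).filter (fun c =>
          PySem.List.pyGetD (PySem.List.pyGetD mat i []) c 0 == 1)).map (fun c => (i, c))) := by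
  unfold listeArcs
  dsimp only
  have h2 := PySem.List.foldl_append_eq_flatMap (fun i =>
    ((PySem.List.pyRange 0 (mat.length : Int) 1).filter (fun c =>
      PySem.List.pyGetD (PySem.List.pyGetD mat i []) c 0 == 1)).map (fun c => (i, c)))
    (PySem.List.pyRange 0 (mat.length : Int) 1) []
  rw [List.nil_append] at h2
  refine Eq.trans (PySem.List.foldl_congr_mem _ _ _ _ ?_) h2
  intro acc i _
  exact PySem.List.foldl_append_if _ _ _ _

-- membership in the arc list
theorem mem_listeArcs (mat : List (List Int)) (a b : Int) :
    (a, b) ∈ listeArcs mat ↔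
      0 ≤ a ∧ a < (mat.length : Int) ∧ 0 ≤ b ∧ b < (mat.length : Int) ∧
      PySem.List.pyGetD (PySem.List.pyGetD mat a []) b 0 = 1 := by
  rw [listeArcs_eq]
  simp only [List.mem_flatMap, List.mem_map, List.mem_filter,
    PySem.List.mem_pyRange_one, Prod.mk.injEq, beq_iff_eq]
  constructor
  · rintro ⟨i, ⟨hi0, hin⟩, c, ⟨⟨hc0, hcn⟩, hval⟩, rfl, rfl⟩
    exact ⟨hi0, hin, hc0, hcn, hval⟩
  · rintro ⟨ha0, han, hb0, hbn, hval⟩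
    exact ⟨a, ⟨ha0, han⟩, b, ⟨⟨hb0, hbn⟩, hval⟩, rfl, rfl⟩

-- 'for x in l: if p(x): res = True'  is  'b || l.any p'
theorem foldl_flag_any {α : Type} (p : α → Bool) (l : List α) (b : Bool) :
    l.foldl (fun res x => if p x then true else res) b = (b || l.any p) := by
  induction l generalizing b with
  | nil => simp
  | cons x xs ih =>
    simp only [List.foldl_cons, List.any_cons, ih]
    by_cases h : p x = true <;> simp [h]

-- A's scan of the arc list decides membership of (S,V) or (V,S)
theorem est_voisin_eq_any (mat : List (List Int)) (S V : Int) :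
    est_voisin mat S V =
      (listeArcs mat).any (fun a => a == (S, V) || a == (V, S)) := by
  unfold est_voisin
  dsimp only
  rw [PySem.List.foldl_pyRange_zero_pyGetD' (listeArcs mat) (0, 0)
    (fun res a => if a == (S, V) || a == (V, S) then true else res) false]
  rw [foldl_flag_any]
  simp

-- ===== VERDICT (by name: the statement is the Claim_ definition above) =====
theorem est_voisin_spec : Claim_equal_est_voisin := by
  intro mat S V _ _
  unfold Spec_est_voisin est_voisin_alt
  rw [Bool.eq_iff_iff, est_voisin_eq_any]
  simp only [List.any_eq_true, Bool.or_eq_true, beq_iff_eq]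
  constructor
  · rintro ⟨a, ha, rfl | rfl⟩
    · rw [mem_listeArcs] at ha
      obtain ⟨h1, h2, h3, h4, h5⟩ := ha
      rw [if_pos ⟨h1, h2, h3, h4⟩]
      simp [h5]
    · rw [mem_listeArcs] at ha
      obtain ⟨h1, h2, h3, h4, h5⟩ := ha
      rw [if_pos ⟨h3, h4, h1, h2⟩]
      simp [h5]
  · intro hr
    by_cases h : 0 ≤ S ∧ S < (mat.length : Int) ∧ 0 ≤ V ∧ V < (mat.length : Int)
    · rw [if_pos h] at hr
      obtain ⟨hS0, hSn, hV0, hVn⟩ := h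
      rw [Bool.or_eq_true] at hr
      rcases hr with hv | hv
      · exact ⟨(S, V), (mem_listeArcs mat S V).mpr ⟨hS0, hSn, hV0, hVn, beq_iff_eq.mp hv⟩,
          Or.inl rfl⟩
      · exact ⟨(V, S), (mem_listeArcs mat V S).mpr ⟨hV0, hVn, hS0, hSn, beq_iff_eq.mp hv⟩,
          Or.inr rfl⟩
    · rw [if_neg h] at hr
      exact absurd hr (by simp)
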